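-- pv_equiv track=rewrite | github.com/MaSiRoProjectOSS/CodeLanguageConverter | converter/converter/cpp_code_converter.py | avoid_unnecessary_comment_before_class_definition
-- ===== SOURCE A (Python) =====
-- def avoid_unnecessary_comment_before_class_definition(original_code: str):
--     code_lines = original_code.split("\n")
--     output_text = ""
--     class_started = False
--
--     for i, line in enumerate(code_lines):
--         if "::" in line:
--             class_started = True
--             output_text += line + "\n"
--         else:
--             if True == class_started:
--                 output_text += line + "\n"
--
--     return output_text
-- ===== SOURCE B (Python) =====
-- def avoid_unnecessary_comment_before_class_definition(original_code: str):
--     code_lines = original_code.split("\n")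
--     for i, line in enumerate(code_lines):
--         if "::" in line:
--             return "".join(l + "\n" for l in code_lines[i:])
--     return ""
-- ===== Notes on version B (the rewrite author's own statement) =====
-- stated objective: simpler
-- what changed: Replaces A's flag-carrying single pass (class_started boolean with string += in two branches) by a find-the-pivot-then-join-the-tail-slice decomposition: locate the first line containing '::', then join code_lines[i:] each with a trailing newline; no flag, early return.
import Mathlib
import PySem

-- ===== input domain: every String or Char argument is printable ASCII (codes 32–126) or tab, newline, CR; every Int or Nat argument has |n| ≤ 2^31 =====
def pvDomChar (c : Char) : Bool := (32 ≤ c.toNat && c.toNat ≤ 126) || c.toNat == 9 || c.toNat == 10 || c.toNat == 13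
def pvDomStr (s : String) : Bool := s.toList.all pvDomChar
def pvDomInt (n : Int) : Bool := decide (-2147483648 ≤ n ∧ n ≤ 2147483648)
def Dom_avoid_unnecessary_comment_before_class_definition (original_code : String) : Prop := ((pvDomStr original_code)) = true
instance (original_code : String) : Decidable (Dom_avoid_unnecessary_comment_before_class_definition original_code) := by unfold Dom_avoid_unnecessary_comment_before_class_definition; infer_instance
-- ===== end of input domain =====

-- B replaces A's flag-carrying single pass by find-first-'::'-line-then-join-tail-slice (objective: simpler).

-- ===== PORT A =====
-- lines and the accumulated output are kept as List Char (String.ofList at the end)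
-- because Lean's own String.append is kernel-opaque; state = (output, class_started).
def avoid_unnecessary_comment_before_class_definition (original_code : String) : String :=
  let code_lines := PySem.Chars.splitOn original_code.toList ['\n']
  let st := code_lines.foldl (fun (st : List Char × Bool) line =>
    if PySem.Chars.isIn [':', ':'] line then (st.1 ++ line ++ ['\n'], true)
    else if st.2 then (st.1 ++ line ++ ['\n'], st.2) else st) ([], false)
  String.ofList st.1

-- ===== PORT B =====
def avoid_unnecessary_comment_before_class_definition_alt (original_code : String) : String :=
  let code_lines := PySem.Chars.splitOn original_code.toList ['\n']
  match code_lines.findIdx? (fun l => PySem.Chars.isIn [':', ':'] l) with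
  | none => ""
  | some i => String.ofList (((code_lines.drop i).map (fun l => l ++ ['\n'])).flatten)

-- ===== PRECONDITION & SPEC =====
def Spec_avoid_unnecessary_comment_before_class_definition (original_code : String) (out : String) : Prop := out = avoid_unnecessary_comment_before_class_definition_alt original_code
instance (original_code : String) (out : String) : Decidable (Spec_avoid_unnecessary_comment_before_class_definition original_code out) := by unfold Spec_avoid_unnecessary_comment_before_class_definition; infer_instance

-- ===== CLAIM (what is proved, stated in full; the proofs are below) =====
def Claim_equal_avoid_unnecessary_comment_before_class_definition : Prop := ∀ (original_code : String), Dom_avoid_unnecessary_comment_before_class_definition original_code → Spec_avoid_unnecessary_comment_before_class_definition original_code (avoid_unnecessary_comment_before_class_definition original_code)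

-- ===== LEMMAS AND PROOFS =====

-- once the flag is set, A's loop appends every remaining line
theorem pvA_loop_true (ls : List (List Char)) (acc : List Char) :
    ls.foldl (fun (st : List Char × Bool) line =>
      if PySem.Chars.isIn [':', ':'] line then (st.1 ++ line ++ ['\n'], true)
      else if st.2 then (st.1 ++ line ++ ['\n'], st.2) else st) (acc, true)
      = (acc ++ (ls.map (fun l => l ++ ['\n'])).flatten, true) := by
  induction ls generalizing acc with
  | nil => simp
  | cons x xs ih =>
    simp only [List.foldl_cons, List.map_cons, List.flatten_cons]
    split_ifs <;> rw [ih] <;> simp [List.append_assoc]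

-- before the flag is set, A's loop computes B's find-then-tail result
theorem pvA_loop_false (ls : List (List Char)) :
    (ls.foldl (fun (st : List Char × Bool) line =>
      if PySem.Chars.isIn [':', ':'] line then (st.1 ++ line ++ ['\n'], true)
      else if st.2 then (st.1 ++ line ++ ['\n'], st.2) else st) ([], false)).1
      = (match ls.findIdx? (fun l => PySem.Chars.isIn [':', ':'] l) with
         | none => []
         | some i => ((ls.drop i).map (fun l => l ++ ['\n'])).flatten) := by
  induction ls with
  | nil => simp
  | cons x xs ih =>
    by_cases hx : PySem.Chars.isIn [':', ':'] x = true
    · simp only [List.foldl_cons, hx, if_true, List.findIdx?_cons]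
      rw [pvA_loop_true]
      simp
    · simp only [List.foldl_cons, hx, Bool.false_eq_true, if_false]
      rw [ih]
      simp only [List.findIdx?_cons, hx, Bool.false_eq_true, if_false]
      cases xs.findIdx? (fun l => PySem.Chars.isIn [':', ':'] l) <;> simp

-- ===== VERDICT (by name: the statement is the Claim_ definition above) =====
theorem avoid_unnecessary_comment_before_class_definition_spec : Claim_equal_avoid_unnecessary_comment_before_class_definition := by
  intro s _
  unfold Spec_avoid_unnecessary_comment_before_class_definition
  unfold avoid_unnecessary_comment_before_class_definition avoid_unnecessary_comment_before_class_definition_alt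
  simp only
  rw [pvA_loop_false]
  cases h : (PySem.Chars.splitOn s.toList ['\n']).findIdx? (fun l => PySem.Chars.isIn [':', ':'] l) <;> simp
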